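-- pv_equiv track=rewrite | github.com/SLAC-ML/Badger | src/badger/utils.py | run_names_to_dict
-- ===== SOURCE A (Python) =====
-- def run_names_to_dict(run_names):
--     runs = {}
--     for name in run_names:
--         tokens = name.split('-')
--         year = tokens[1]
--         month = tokens[2]
--         day = tokens[3]
--
--         try:
--             year_dict = runs[year]
--         except:
--             runs[year] = {}
--             year_dict = runs[year]
--         key_month = f'{year}-{month}'
--         try:
--             month_dict = year_dict[key_month]
--         except:
--             year_dict[key_month] = {}
--             month_dict = year_dict[key_month]
--         key_day = f'{year}-{month}-{day}'
--         try:
--             day_list = month_dict[key_day]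
--         except:
--             month_dict[key_day] = []
--             day_list = month_dict[key_day]
--         day_list.append(name)
--
--     return runs
-- ===== SOURCE B (Python) =====
-- def _uniq(xs):
--     return list(dict.fromkeys(xs))
--
--
-- def _days(year, month, mtoks):
--     return {
--         f'{year}-{month}-{d}': [n for n, t in mtoks if t[3] == d]
--         for d in _uniq(t[3] for _, t in mtoks)
--     }
--
--
-- def _months(year, ytoks):
--     return {
--         f'{year}-{m}': _days(year, m, [(n, t) for n, t in ytoks if t[2] == m])
--         for m in _uniq(t[2] for _, t in ytoks)
--     }
--
--
-- def run_names_to_dict(run_names):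
--     toks = [(n, n.split('-')) for n in run_names]
--     return {
--         y: _months(y, [(n, t) for n, t in toks if t[1] == y])
--         for y in _uniq(t[1] for _, t in toks)
--     }
-- ===== Notes on version B (the rewrite author's own statement) =====
-- stated objective: simpler
-- what changed: A builds the nested year/month/day dict incrementally, mutating per-level sub-dicts with try/except get-or-create for every name; B tokenizes once and builds the result top-down as a pure three-level group-by (dedup of key components in first-seen order, day lists by filtering), with no mutation or exception-driven control flow.
import Mathlib
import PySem

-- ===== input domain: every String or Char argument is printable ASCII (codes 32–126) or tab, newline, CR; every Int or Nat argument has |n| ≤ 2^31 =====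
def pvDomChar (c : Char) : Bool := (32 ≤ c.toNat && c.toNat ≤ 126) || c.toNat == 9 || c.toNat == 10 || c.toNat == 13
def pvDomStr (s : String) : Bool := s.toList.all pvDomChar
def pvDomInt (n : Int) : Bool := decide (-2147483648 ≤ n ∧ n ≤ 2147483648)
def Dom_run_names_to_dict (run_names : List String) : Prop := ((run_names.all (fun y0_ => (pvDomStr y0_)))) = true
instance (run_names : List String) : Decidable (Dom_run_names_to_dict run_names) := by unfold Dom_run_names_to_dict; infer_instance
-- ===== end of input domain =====

-- B replaces A's incremental nested-dict mutation (try/except get-or-create per name) by a pure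
-- three-level group-by: dedup the year/month/day key components in first-seen order and build each
-- nested dict by filtering; objective: simpler (no mutation, no exception-driven control flow).

-- shared tokenizer: name.split('-')  (sep "-" is non-empty, so split? is always some)
def pvTokens (name : String) : List String := (PySem.Str.split? name "-").getD []

-- ===== PORT A =====
def pvStepA (runs : PySem.Dict String (PySem.Dict String (PySem.Dict String (List String))))
    (name : String) : PySem.Dict String (PySem.Dict String (PySem.Dict String (List String))) :=
  let tokens := pvTokens name
  let year := PySem.List.pyGetD tokens 1 ""
  let month := PySem.List.pyGetD tokens 2 ""
  let day := PySem.List.pyGetD tokens 3 ""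
  -- try runs[year] / except: runs[year] = {}  — get-or-create, re-inserted at the end (models the
  -- in-place mutation of the aliased sub-dicts; insert overwrites in place, appends if new)
  let year_dict := runs.getD year PySem.Dict.empty
  let key_month := year ++ "-" ++ month
  let month_dict := year_dict.getD key_month PySem.Dict.empty
  let key_day := year ++ "-" ++ month ++ "-" ++ day
  let day_list := month_dict.getD key_day []
  runs.insert year (year_dict.insert key_month (month_dict.insert key_day (day_list ++ [name])))

def run_names_to_dict (run_names : List String) :
    List (String × List (String × List (String × List String))) :=
  ((run_names.foldl pvStepA PySem.Dict.empty).items.map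
    (fun yp => (yp.1, yp.2.items.map (fun mp => (mp.1, mp.2.items)))))

-- ===== PORT B =====
def pvT (i : Int) (p : String × List String) : String := PySem.List.pyGetD p.2 i ""

def pvDays (year month : String) (mtoks : List (String × List String)) :
    List (String × List String) :=
  (PySem.List.dedup (mtoks.map (pvT 3))).map
    (fun d => (year ++ "-" ++ month ++ "-" ++ d,
               (mtoks.filter (fun p => pvT 3 p == d)).map (fun p => p.1)))

def pvMonths (year : String) (ytoks : List (String × List String)) :
    List (String × List (String × List String)) :=
  (PySem.List.dedup (ytoks.map (pvT 2))).map
    (fun m => (year ++ "-" ++ m, pvDays year m (ytoks.filter (fun p => pvT 2 p == m))))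

def run_names_to_dict_alt (run_names : List String) :
    List (String × List (String × List (String × List String))) :=
  let toks := run_names.map (fun n => (n, pvTokens n))
  (PySem.List.dedup (toks.map (pvT 1))).map
    (fun y => (y, pvMonths y (toks.filter (fun p => pvT 1 p == y))))

-- ===== PRECONDITION & SPEC =====
-- Pre_ excludes exactly the inputs on which Python A raises IndexError: a name whose
-- split('-') has fewer than 4 tokens (B raises there as well).
def Pre_run_names_to_dict (run_names : List String) : Prop :=
  ∀ name ∈ run_names, 4 ≤ (pvTokens name).length
instance (run_names : List String) : Decidable (Pre_run_names_to_dict run_names) := by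
  unfold Pre_run_names_to_dict; infer_instance

def pvWitness_run_names_to_dict : List String := ["BadgerOpt-2025-01-02-000001"]

def Spec_run_names_to_dict (run_names : List String)
    (out : List (String × List (String × List (String × List String)))) : Prop :=
  out = run_names_to_dict_alt run_names
instance (run_names : List String) (out : List (String × List (String × List (String × List String)))) : Decidable (Spec_run_names_to_dict run_names out) := by unfold Spec_run_names_to_dict; infer_instance

-- ===== CLAIM (what is proved, stated in full; the proofs are below) =====
def Claim_equal_run_names_to_dict : Prop := ∀ (run_names : List String), Dom_run_names_to_dict run_names → Pre_run_names_to_dict run_names → Spec_run_names_to_dict run_names (run_names_to_dict run_names)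

-- ===== LEMMAS AND PROOFS =====

-- Dict-valued mirrors of the three grouping levels (items of these are B's nested lists)
def pvDD3 (y m : String) (mt : List (String × List String)) : PySem.Dict String (List String) :=
  ⟨pvDays y m mt⟩

def pvDD2 (y : String) (yt : List (String × List String)) :
    PySem.Dict String (PySem.Dict String (List String)) :=
  ⟨(PySem.List.dedup (yt.map (pvT 2))).map
    (fun m => (y ++ "-" ++ m, pvDD3 y m (yt.filter (fun p => pvT 2 p == m))))⟩

def pvDD1 (ps : List (String × List String)) :
    PySem.Dict String (PySem.Dict String (PySem.Dict String (List String))) :=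
  ⟨(PySem.List.dedup (ps.map (pvT 1))).map
    (fun y => (y, pvDD2 y (ps.filter (fun p => pvT 1 p == y))))⟩

-- pvStepA, acting on a (name, tokens) pair, lets expanded
def pvStepP (runs : PySem.Dict String (PySem.Dict String (PySem.Dict String (List String))))
    (p : String × List String) :
    PySem.Dict String (PySem.Dict String (PySem.Dict String (List String))) :=
  runs.insert (pvT 1 p)
    ((runs.getD (pvT 1 p) PySem.Dict.empty).insert (pvT 1 p ++ "-" ++ pvT 2 p)
      (((runs.getD (pvT 1 p) PySem.Dict.empty).getD (pvT 1 p ++ "-" ++ pvT 2 p)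
          PySem.Dict.empty).insert
        (pvT 1 p ++ "-" ++ pvT 2 p ++ "-" ++ pvT 3 p)
        (((runs.getD (pvT 1 p) PySem.Dict.empty).getD (pvT 1 p ++ "-" ++ pvT 2 p)
            PySem.Dict.empty).getD
          (pvT 1 p ++ "-" ++ pvT 2 p ++ "-" ++ pvT 3 p) [] ++ [p.1])))

theorem pv_strcancel (s t u : String) (h : s ++ t = s ++ u) : t = u := by
  have h2 := congrArg String.toList h
  simp only [String.toList_append] at h2
  exact String.toList_injective (List.append_cancel_left h2)

theorem pv_get?_mk_map {α V : Type} [DecidableEq α] (ks : List α) (lab : α → String)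
    (F : α → V) (k : α) (hinj : ∀ a ∈ ks, lab a = lab k → a = k) :
    (PySem.Dict.mk (ks.map (fun a => (lab a, F a)))).get? (lab k) =
      if k ∈ ks then some (F k) else none := by
  induction ks with
  | nil => simp [PySem.Dict.get?]
  | cons a ks ih =>
    simp only [List.map_cons, PySem.Dict.get?_mk_cons]
    by_cases hak : lab a = lab k
    · have : a = k := hinj a (by simp) hak
      subst this
      simp
    · have hne : a ≠ k := fun h => hak (by rw [h])
      have hb : (lab a == lab k) = false := by simp [hak]
      rw [hb]
      simp only [Bool.false_eq_true, if_false]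
      rw [ih (fun b hb => hinj b (by simp [hb]))]
      simp [List.mem_cons, Ne.symm hne]

theorem pv_getD_mk_map {α V : Type} [DecidableEq α] (ks : List α) (lab : α → String)
    (F : α → V) (k : α) (d0 : V) (hinj : ∀ a ∈ ks, lab a = lab k → a = k) :
    (PySem.Dict.mk (ks.map (fun a => (lab a, F a)))).getD (lab k) d0 =
      if k ∈ ks then F k else d0 := by
  rw [PySem.Dict.getD_eq_get?_getD, pv_get?_mk_map ks lab F k hinj]
  by_cases h : k ∈ ks <;> simp [h]

theorem pv_contains_mk_map {α V : Type} [DecidableEq α] (ks : List α) (lab : α → String)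
    (F : α → V) (k : α) (hinj : ∀ a ∈ ks, lab a = lab k → a = k) :
    (PySem.Dict.mk (ks.map (fun a => (lab a, F a)))).contains (lab k) = decide (k ∈ ks) := by
  rw [PySem.Dict.contains_mk]
  rcases Decidable.em (k ∈ ks) with h | h
  · simp only [h, decide_true]
    rw [List.any_eq_true]
    exact ⟨(lab k, F k), List.mem_map.mpr ⟨k, h, rfl⟩, by simp⟩
  · simp only [h, decide_false]
    rw [List.any_eq_false]
    rintro ⟨x1, x2⟩ hx
    obtain ⟨a, ha, he⟩ := List.mem_map.mp hx
    obtain ⟨he1, he2⟩ := Prod.mk.injEq .. ▸ he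
    simp only [← he1]
    intro hbad
    exact h (hinj a ha (by simpa using hbad) ▸ ha)

theorem pv_insert_mk_map {α V : Type} [DecidableEq α] (ks : List α) (lab : α → String)
    (F : α → V) (k : α) (v : V) (hinj : ∀ a ∈ ks, lab a = lab k → a = k) :
    (PySem.Dict.mk (ks.map (fun a => (lab a, F a)))).insert (lab k) v =
      PySem.Dict.mk ((if k ∈ ks then ks else ks ++ [k]).map
        (fun a => (lab a, if a = k then v else F a))) := by
  apply PySem.Dict.ext
  rw [PySem.Dict.items_insert, pv_contains_mk_map ks lab F k hinj]
  rcases Decidable.em (k ∈ ks) with h | h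
  · simp only [h, decide_true, if_true]
    show (List.map (fun a => (lab a, F a)) ks).map _ = _
    rw [List.map_map]
    apply List.map_congr_left
    intro a ha
    by_cases hak : a = k
    · subst hak; simp
    · have hlk : lab a ≠ lab k := fun he => hak (hinj a ha he)
      simp [Function.comp, hlk, hak]
  · simp only [h, decide_false, if_false]
    show List.map (fun a => (lab a, F a)) ks ++ [(lab k, v)] = _
    rw [List.map_append]
    congr 1
    · apply List.map_congr_left
      intro a ha
      have hak : a ≠ k := fun he => h (he ▸ ha)
      simp [hak]
    · simp

theorem pv_dedup_append_singleton {α : Type} [BEq α] [LawfulBEq α] (l : List α) (a : α) :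
    PySem.List.dedup (l ++ [a]) =
      if a ∈ l then PySem.List.dedup l else PySem.List.dedup l ++ [a] := by
  have hmem : a ∈ List.foldl PySem.Set.add [] l ↔ a ∈ l := PySem.Set.mem_ofList l a
  simp only [PySem.List.dedup, PySem.Set.ofList, List.foldl_append, List.foldl_cons,
    List.foldl_nil]
  rw [PySem.Set.add]
  by_cases h : a ∈ l
  · have hc : PySem.Set.contains (List.foldl PySem.Set.add PySem.Set.empty l) a = true := by
      simp [PySem.Set.contains, PySem.Set.empty, hmem, h]
    simp [h, hmem]
  · have hc : PySem.Set.contains (List.foldl PySem.Set.add PySem.Set.empty l) a = false := by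
      simp [PySem.Set.contains, PySem.Set.empty, hmem, h]
    simp [hc, h, hmem]

theorem pv_mem_dedup {α : Type} [BEq α] [LawfulBEq α] (l : List α) (a : α) :
    a ∈ PySem.List.dedup l ↔ a ∈ l := PySem.Set.mem_ofList l a

theorem pv_filter_append_singleton {α : Type} (l : List α) (a : α) (q : α → Bool) :
    (l ++ [a]).filter q = l.filter q ++ if q a then [a] else [] := by
  rw [List.filter_append]
  congr 1
  by_cases h : q a <;> simp [h]

theorem pv_filter_eq_nil_of_not_mem_map {α β : Type} [DecidableEq β] (l : List α) (f : α → β)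
    (b : β) (h : b ∉ l.map f) : l.filter (fun x => f x == b) = [] := by
  rw [List.filter_eq_nil_iff]
  intro x hx
  simp only [beq_iff_eq]
  intro he
  exact h (List.mem_map.mpr ⟨x, hx, he⟩)

-- day level: inserting one run (its day = pvT 3 p) into the grouped day dict
theorem pv_step3 (y m : String) (mt : List (String × List String)) (p : String × List String) :
    (pvDD3 y m mt).insert (y ++ "-" ++ m ++ "-" ++ pvT 3 p)
      ((pvDD3 y m mt).getD (y ++ "-" ++ m ++ "-" ++ pvT 3 p) [] ++ [p.1]) =
    pvDD3 y m (mt ++ [p]) := by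
  have hinj : ∀ a ∈ PySem.List.dedup (mt.map (pvT 3)),
      (fun d' => y ++ "-" ++ m ++ "-" ++ d') a = (fun d' => y ++ "-" ++ m ++ "-" ++ d') (pvT 3 p) →
        a = pvT 3 p := fun a _ h => pv_strcancel _ _ _ h
  unfold pvDD3 pvDays
  rw [pv_getD_mk_map (PySem.List.dedup (mt.map (pvT 3)))
        (fun d' => y ++ "-" ++ m ++ "-" ++ d')
        (fun d' => (mt.filter (fun q => pvT 3 q == d')).map (fun q => q.1)) (pvT 3 p) [] hinj,
      pv_insert_mk_map (PySem.List.dedup (mt.map (pvT 3)))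
        (fun d' => y ++ "-" ++ m ++ "-" ++ d')
        (fun d' => (mt.filter (fun q => pvT 3 q == d')).map (fun q => q.1)) (pvT 3 p) _ hinj]
  rw [List.map_append, List.map_cons, List.map_nil, pv_dedup_append_singleton]
  by_cases h : pvT 3 p ∈ mt.map (pvT 3)
  · rw [if_pos h, if_pos ((pv_mem_dedup _ _).mpr h), if_pos ((pv_mem_dedup _ _).mpr h)]
    congr 1
    apply List.map_congr_left
    intro a _
    by_cases had : a = pvT 3 p
    · subst had
      rw [if_pos rfl]
      rw [pv_filter_append_singleton, if_pos (by simp)]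
      simp
    · rw [if_neg had]
      rw [pv_filter_append_singleton, if_neg (by simp [Ne.symm had])]
      simp
  · have hd : pvT 3 p ∉ PySem.List.dedup (mt.map (pvT 3)) := fun hc => h ((pv_mem_dedup _ _).mp hc)
    rw [if_neg h, if_neg hd, if_neg hd]
    congr 1
    rw [List.map_append, List.map_append, List.map_cons, List.map_cons, List.map_nil,
      List.map_nil]
    congr 1
    · apply List.map_congr_left
      intro a ha
      have had : a ≠ pvT 3 p := fun he => hd (he ▸ ha)
      rw [if_neg had]
      rw [pv_filter_append_singleton, if_neg (by simp [Ne.symm had])]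
      simp
    · rw [if_pos rfl]
      rw [pv_filter_append_singleton, if_pos (by simp)]
      rw [pv_filter_eq_nil_of_not_mem_map mt (pvT 3) (pvT 3 p) h]
      simp

-- month level
theorem pv_step2 (y : String) (yt : List (String × List String)) (p : String × List String) :
    (pvDD2 y yt).insert (y ++ "-" ++ pvT 2 p)
      (((pvDD2 y yt).getD (y ++ "-" ++ pvT 2 p) PySem.Dict.empty).insert
        (y ++ "-" ++ pvT 2 p ++ "-" ++ pvT 3 p)
        (((pvDD2 y yt).getD (y ++ "-" ++ pvT 2 p) PySem.Dict.empty).getD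
          (y ++ "-" ++ pvT 2 p ++ "-" ++ pvT 3 p) [] ++ [p.1])) =
    pvDD2 y (yt ++ [p]) := by
  have hinj : ∀ a ∈ PySem.List.dedup (yt.map (pvT 2)),
      (fun m' => y ++ "-" ++ m') a = (fun m' => y ++ "-" ++ m') (pvT 2 p) → a = pvT 2 p :=
    fun a _ h => pv_strcancel _ _ _ h
  unfold pvDD2
  rw [pv_getD_mk_map (PySem.List.dedup (yt.map (pvT 2))) (fun m' => y ++ "-" ++ m')
        (fun m' => pvDD3 y m' (yt.filter (fun q => pvT 2 q == m'))) (pvT 2 p)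
        PySem.Dict.empty hinj,
      pv_insert_mk_map (PySem.List.dedup (yt.map (pvT 2))) (fun m' => y ++ "-" ++ m')
        (fun m' => pvDD3 y m' (yt.filter (fun q => pvT 2 q == m'))) (pvT 2 p) _ hinj]
  rw [List.map_append, List.map_cons, List.map_nil, pv_dedup_append_singleton]
  by_cases h : pvT 2 p ∈ yt.map (pvT 2)
  · rw [if_pos h, if_pos ((pv_mem_dedup _ _).mpr h), if_pos ((pv_mem_dedup _ _).mpr h)]
    congr 1
    apply List.map_congr_left
    intro a _
    by_cases ham : a = pvT 2 p
    · subst ham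
      rw [if_pos rfl]
      rw [pv_filter_append_singleton, if_pos (by simp)]
      exact congrArg _ (pv_step3 y (pvT 2 p) (yt.filter (fun q => pvT 2 q == pvT 2 p)) p)
    · rw [if_neg ham]
      rw [pv_filter_append_singleton, if_neg (by simp [Ne.symm ham])]
      simp
  · have hd : pvT 2 p ∉ PySem.List.dedup (yt.map (pvT 2)) := fun hc => h ((pv_mem_dedup _ _).mp hc)
    rw [if_neg h, if_neg hd, if_neg hd]
    congr 1
    rw [List.map_append, List.map_append, List.map_cons, List.map_cons, List.map_nil,
      List.map_nil]
    congr 1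
    · apply List.map_congr_left
      intro a ha
      have ham : a ≠ pvT 2 p := fun he => hd (he ▸ ha)
      rw [if_neg ham]
      rw [pv_filter_append_singleton, if_neg (by simp [Ne.symm ham])]
      simp
    · rw [if_pos rfl]
      rw [pv_filter_append_singleton, if_pos (by simp)]
      rw [pv_filter_eq_nil_of_not_mem_map yt (pvT 2) (pvT 2 p) h]
      have hempty :
          (PySem.Dict.empty : PySem.Dict String (List String)) = pvDD3 y (pvT 2 p) [] := rfl
      rw [hempty, pv_step3 y (pvT 2 p) [] p]

-- year level: one step of A's loop on the grouped dict
theorem pv_step1 (ps : List (String × List String)) (p : String × List String) :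
    pvStepP (pvDD1 ps) p = pvDD1 (ps ++ [p]) := by
  have hinj : ∀ a ∈ PySem.List.dedup (ps.map (pvT 1)),
      (fun y' => y') a = (fun y' => y') (pvT 1 p) → a = pvT 1 p := fun a _ h => h
  unfold pvStepP pvDD1
  rw [pv_getD_mk_map (PySem.List.dedup (ps.map (pvT 1))) (fun y' => y')
        (fun y' => pvDD2 y' (ps.filter (fun q => pvT 1 q == y'))) (pvT 1 p)
        PySem.Dict.empty hinj,
      pv_insert_mk_map (PySem.List.dedup (ps.map (pvT 1))) (fun y' => y')
        (fun y' => pvDD2 y' (ps.filter (fun q => pvT 1 q == y'))) (pvT 1 p) _ hinj]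
  rw [List.map_append, List.map_cons, List.map_nil, pv_dedup_append_singleton]
  by_cases h : pvT 1 p ∈ ps.map (pvT 1)
  · rw [if_pos h, if_pos ((pv_mem_dedup _ _).mpr h), if_pos ((pv_mem_dedup _ _).mpr h)]
    congr 1
    apply List.map_congr_left
    intro a _
    by_cases hay : a = pvT 1 p
    · subst hay
      rw [if_pos rfl]
      rw [pv_filter_append_singleton, if_pos (by simp)]
      exact congrArg _ (pv_step2 (pvT 1 p) (ps.filter (fun q => pvT 1 q == pvT 1 p)) p)
    · rw [if_neg hay]
      rw [pv_filter_append_singleton, if_neg (by simp [Ne.symm hay])]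
      simp
  · have hd : pvT 1 p ∉ PySem.List.dedup (ps.map (pvT 1)) := fun hc => h ((pv_mem_dedup _ _).mp hc)
    rw [if_neg h, if_neg hd, if_neg hd]
    congr 1
    rw [List.map_append, List.map_append, List.map_cons, List.map_cons, List.map_nil,
      List.map_nil]
    congr 1
    · apply List.map_congr_left
      intro a ha
      have hay : a ≠ pvT 1 p := fun he => hd (he ▸ ha)
      rw [if_neg hay]
      rw [pv_filter_append_singleton, if_neg (by simp [Ne.symm hay])]
      simp
    · rw [if_pos rfl]
      rw [pv_filter_append_singleton, if_pos (by simp)]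
      rw [pv_filter_eq_nil_of_not_mem_map ps (pvT 1) (pvT 1 p) h]
      have hempty :
          (PySem.Dict.empty : PySem.Dict String (PySem.Dict String (List String))) =
            pvDD2 (pvT 1 p) [] := rfl
      rw [hempty, pv_step2 (pvT 1 p) [] p]

theorem pv_stepA_eq_stepP (r : PySem.Dict String (PySem.Dict String (PySem.Dict String (List String))))
    (n : String) : pvStepA r n = pvStepP r (n, pvTokens n) := rfl

theorem pv_fold_eq (ps : List (String × List String)) :
    ps.foldl pvStepP PySem.Dict.empty = pvDD1 ps := by
  induction ps using List.reverseRecOn with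
  | nil => rfl
  | append_singleton ps p ih =>
    rw [List.foldl_append, List.foldl_cons, List.foldl_nil, ih, pv_step1]

-- ===== VERDICT (by name: the statement is the Claim_ definition above) =====
theorem run_names_to_dict_spec : Claim_equal_run_names_to_dict := by
  intro run_names _ _
  show run_names_to_dict run_names = run_names_to_dict_alt run_names
  unfold run_names_to_dict run_names_to_dict_alt
  have hf : (fun (x : PySem.Dict String (PySem.Dict String (PySem.Dict String (List String))))
      (y : String) => pvStepP x (y, pvTokens y)) = pvStepA := by
    funext r n
    exact (pv_stepA_eq_stepP r n).symm
  have h1 : run_names.foldl pvStepA PySem.Dict.empty =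
      (run_names.map (fun n => (n, pvTokens n))).foldl pvStepP PySem.Dict.empty := by
    rw [List.foldl_map, hf]
  rw [h1, pv_fold_eq]
  simp [pvDD1, pvDD2, pvDD3, pvMonths, List.map_map, Function.comp]
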